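-- pv_equiv track=rewrite | github.com/cvs-health/AskRITA | askrita/utils/token_utils.py | truncate_list_to_tokens
-- ===== SOURCE A (Python) =====
-- from typing import Any, Dict, List, Optional
--
-- def estimate_token_count(text: str) -> int:
--     """
--     Estimate token count for text using a simple heuristic.
--
--     This is a rough approximation: 1 token ≈ 4 characters for English text.
--     For more accurate counting, consider using tiktoken for OpenAI models.
--
--     Args:
--         text: Input text to count tokens for
--
--     Returns:
--         Estimated token count
--     """
--     if not text:
--         return 0
--
--     # Simple heuristic: roughly 4 characters per token
--     # This tends to overestimate slightly, which is safer
--     return len(text) // 4 + 1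
--
-- def truncate_list_to_tokens(
--     items: List[str], max_tokens: int, item_separator: str = ", "
-- ) -> str:
--     """
--     Truncate a list of items to fit within a token limit.
--
--     Args:
--         items: List of string items to include
--         max_tokens: Maximum number of tokens allowed
--         item_separator: Separator between items
--
--     Returns:
--         Truncated string representation of the list
--     """
--     if not items:
--         return ""
--
--     result_parts = []
--     current_tokens = 0
--     truncated_count = 0
--
--     for item in items:
--         item_str = str(item)
--         item_tokens = estimate_token_count(item_str + item_separator)
--
--         if current_tokens + item_tokens <= max_tokens:
--             result_parts.append(item_str)
--             current_tokens += item_tokens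
--         else:
--             truncated_count = len(items) - len(result_parts)
--             break
--
--     result = item_separator.join(result_parts)
--
--     if truncated_count > 0:
--         result += f"{item_separator}...[{truncated_count} items truncated]"
--
--     return result
-- ===== SOURCE B (Python) =====
-- def truncate_list_to_tokens(items, max_tokens, item_separator=", "):
--     if not items:
--         return ""
--     # Pass 1: cumulative token costs of every prefix.
--     prefix = []
--     total = 0
--     for x in items:
--         n = len(str(x)) + len(item_separator)
--         total += 0 if n == 0 else n // 4 + 1
--         prefix.append(total)
--     # Pass 2: binary-search the rightmost k with prefix[k-1] <= max_tokens
--     # (valid because costs are non-negative, so prefix is non-decreasing).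
--     lo, hi = 0, len(prefix)
--     while lo < hi:
--         mid = (lo + hi) // 2
--         if prefix[mid] <= max_tokens:
--             lo = mid + 1
--         else:
--             hi = mid
--     k = lo
--     result = item_separator.join(str(x) for x in items[:k])
--     if k < len(items):
--         result += f"{item_separator}...[{len(items) - k} items truncated]"
--     return result
-- ===== Notes on version B (the rewrite author's own statement) =====
-- stated objective: alternative
-- what changed: B first materialises the non-decreasing cumulative-cost (prefix-sum) array in one pass and then finds the cutoff by binary search over it, instead of A's single greedy scan that builds result parts and breaks at the first item that does not fit.
import Mathlib
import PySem

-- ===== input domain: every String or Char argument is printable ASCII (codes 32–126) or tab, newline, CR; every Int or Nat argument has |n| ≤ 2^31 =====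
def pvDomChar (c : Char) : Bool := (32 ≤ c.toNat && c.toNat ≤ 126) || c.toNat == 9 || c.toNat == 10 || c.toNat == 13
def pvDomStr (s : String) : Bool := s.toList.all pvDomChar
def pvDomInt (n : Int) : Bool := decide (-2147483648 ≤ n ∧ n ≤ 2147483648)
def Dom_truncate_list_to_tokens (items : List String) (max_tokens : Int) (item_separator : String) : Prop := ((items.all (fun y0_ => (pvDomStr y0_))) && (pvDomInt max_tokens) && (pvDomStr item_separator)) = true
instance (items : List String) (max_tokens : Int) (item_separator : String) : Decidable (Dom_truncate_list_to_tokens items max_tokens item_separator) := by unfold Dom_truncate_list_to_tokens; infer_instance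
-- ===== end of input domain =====

-- B precomputes the cumulative-cost prefix sums and binary-searches the cutoff, instead of A's greedy scan with break (alternative algorithm, same result).

-- ===== PORT A =====
def estimate_token_count (text : String) : Int :=
  if text = "" then 0 else PySem.Int.floordiv (PySem.Str.len text) 4 + 1

-- A's for-loop with break: state = (current_tokens, number of parts so far);
-- returns (result_parts of the remaining items, truncated_count).
def pvALoop (sep : String) (maxT total : Int) : List String → Int → Int → List String × Int
  | [], _, _ => ([], 0)
  | item :: rest, cur, nParts =>
    let t := estimate_token_count (item ++ sep)
    if cur + t ≤ maxT then
      let r := pvALoop sep maxT total rest (cur + t) (nParts + 1)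
      (item :: r.1, r.2)
    else
      ([], total - nParts)

def truncate_list_to_tokens (items : List String) (max_tokens : Int) (item_separator : String) : String :=
  if items = [] then ""
  else
    let r := pvALoop item_separator max_tokens (PySem.List.len items) items 0 0
    let result := PySem.Str.join item_separator r.1
    if r.2 > 0 then
      result ++ (item_separator ++ "...[" ++ PySem.Int.toStr r.2 ++ " items truncated]")
    else result

-- ===== PORT B =====
-- Pass 1 of Source B: the list of cumulative costs (append-loop, written as cons recursion).
def pvPrefix (sepLen : Int) : List String → Int → List Int
  | [], _ => []
  | x :: rest, total =>
    let n := PySem.Str.len x + sepLen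
    let total' := total + (if n = 0 then 0 else PySem.Int.floordiv n 4 + 1)
    total' :: pvPrefix sepLen rest total'

-- Pass 2 of Source B: the while-loop binary search; indices are non-negative, so Nat with
-- Nat `(lo+hi)/2` is exact for Python's `(lo+hi)//2`; `prefix[mid]` is in range whenever
-- lo < hi ≤ len, so getD's default is never used.
def pvBSearch (pfx : List Int) (maxT : Int) (lo hi : Nat) : Nat :=
  if lo < hi then
    let mid := (lo + hi) / 2
    if pfx.getD mid 0 ≤ maxT then pvBSearch pfx maxT (mid + 1) hi
    else pvBSearch pfx maxT lo mid
  else lo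
termination_by hi - lo
decreasing_by all_goals omega

def truncate_list_to_tokens_alt (items : List String) (max_tokens : Int) (item_separator : String) : String :=
  if items = [] then ""
  else
    let pfx := pvPrefix (PySem.Str.len item_separator) items 0
    let k := pvBSearch pfx max_tokens 0 pfx.length
    let result := PySem.Str.join item_separator (items.take k)
    if k < items.length then
      result ++ (item_separator ++ "...[" ++ PySem.Int.toStr ((items.length : Int) - k) ++ " items truncated]")
    else result

-- ===== PRECONDITION & SPEC =====
def Spec_truncate_list_to_tokens (items : List String) (max_tokens : Int) (item_separator : String) (out : String) : Prop := out = truncate_list_to_tokens_alt items max_tokens item_separator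
instance (items : List String) (max_tokens : Int) (item_separator : String) (out : String) : Decidable (Spec_truncate_list_to_tokens items max_tokens item_separator out) := by unfold Spec_truncate_list_to_tokens; infer_instance

-- ===== CLAIM (what is proved, stated in full; the proofs are below) =====
def Claim_equal_truncate_list_to_tokens : Prop := ∀ (items : List String) (max_tokens : Int) (item_separator : String), Dom_truncate_list_to_tokens items max_tokens item_separator → Spec_truncate_list_to_tokens items max_tokens item_separator (truncate_list_to_tokens items max_tokens item_separator)

-- ===== LEMMAS AND PROOFS =====

-- Proof-side description of A's greedy cutoff: length of the longest fitting prefix.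
def pvCutoff (sep : String) (maxT : Int) : List String → Int → Nat
  | [], _ => 0
  | item :: rest, total =>
    let n := PySem.Str.len item + PySem.Str.len sep
    let cost := if n = 0 then 0 else PySem.Int.floordiv n 4 + 1
    if total + cost > maxT then 0 else 1 + pvCutoff sep maxT rest (total + cost)

-- A's per-item cost equals the prefix-sum per-item cost.
lemma est_append (a b : String) :
    estimate_token_count (a ++ b) =
      (if PySem.Str.len a + PySem.Str.len b = 0 then 0
       else PySem.Int.floordiv (PySem.Str.len a + PySem.Str.len b) 4 + 1) := by
  unfold estimate_token_count
  rw [PySem.Str.len_append]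
  have hiff : (a ++ b = "") ↔ (PySem.Str.len a + PySem.Str.len b = 0) := by
    simp only [PySem.Str.len_eq_length, String.append_eq_empty_iff]
    constructor
    · rintro ⟨rfl, rfl⟩; rfl
    · intro h
      exact ⟨String.length_eq_zero_iff.mp (by omega), String.length_eq_zero_iff.mp (by omega)⟩
  by_cases h : PySem.Str.len a + PySem.Str.len b = 0
  · rw [if_pos (hiff.mpr h), if_pos h]
  · rw [if_neg (fun hh => h (hiff.mp hh)), if_neg h]

-- The loop of A computes take of the greedy cutoff, plus the truncated count.
lemma aLoop_eq (sep : String) (maxT total : Int) (rest : List String) (cur nParts : Int) :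
    pvALoop sep maxT total rest cur nParts =
      (rest.take (pvCutoff sep maxT rest cur),
       if pvCutoff sep maxT rest cur < rest.length
       then total - (nParts + (pvCutoff sep maxT rest cur : Int)) else 0) := by
  induction rest generalizing cur nParts with
  | nil => simp [pvALoop, pvCutoff]
  | cons item rest ih =>
    simp only [pvALoop, pvCutoff, est_append]
    set t : Int := (if PySem.Str.len item + PySem.Str.len sep = 0 then 0
        else PySem.Int.floordiv (PySem.Str.len item + PySem.Str.len sep) 4 + 1) with ht
    by_cases hc : cur + t ≤ maxT
    · rw [if_pos hc, if_neg (by omega : ¬ cur + t > maxT), ih]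
      set k := pvCutoff sep maxT rest (cur + t) with hk
      rw [Nat.add_comm 1 k]
      simp only [List.take_succ_cons, List.length_cons, Prod.mk.injEq]
      refine ⟨trivial, ?_⟩
      by_cases hkl : k < rest.length
      · rw [if_pos hkl, if_pos (by omega : k + 1 < rest.length + 1)]
        push_cast; ring
      · rw [if_neg hkl, if_neg (by omega : ¬ k + 1 < rest.length + 1)]
    · rw [if_neg hc, if_pos (by omega : cur + t > maxT)]
      simp

lemma prefix_length (sepLen : Int) (xs : List String) (total : Int) :
    (pvPrefix sepLen xs total).length = xs.length := by
  induction xs generalizing total with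
  | nil => rfl
  | cons x rest ih => simp [pvPrefix, ih]

-- With a non-negative separator length every cost is ≥ 0, so prefix sums only grow.
lemma prefix_ge (sepLen : Int) (hs : 0 ≤ sepLen) (xs : List String) (total : Int) :
    ∀ y ∈ pvPrefix sepLen xs total, total ≤ y := by
  induction xs generalizing total with
  | nil => simp [pvPrefix]
  | cons x rest ih =>
    intro y hy
    simp only [pvPrefix, List.mem_cons] at hy
    have hlen : 0 ≤ PySem.Str.len x := by
      simp
    have hcost : 0 ≤ (if PySem.Str.len x + sepLen = 0 then 0
        else PySem.Int.floordiv (PySem.Str.len x + sepLen) 4 + 1) := by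
      split_ifs with h
      · omega
      · have := PySem.Int.le_floordiv_iff_mul_le (a := PySem.Str.len x + sepLen)
          (b := (4:Int)) (q := 0) (by omega)
        omega
    rcases hy with rfl | hy
    · omega
    · have := ih _ _ hy
      omega

-- The greedy cutoff is the length of the ≤-maxT prefix of the cumulative sums.
lemma cutoff_takeWhile (sep : String) (maxT : Int) (xs : List String) (total : Int) :
    ((pvPrefix (PySem.Str.len sep) xs total).takeWhile (fun y => decide (y ≤ maxT))).length
      = pvCutoff sep maxT xs total := by
  induction xs generalizing total with
  | nil => rfl
  | cons x rest ih =>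
    simp only [pvPrefix, pvCutoff, List.takeWhile_cons]
    set c : Int := (if PySem.Str.len x + PySem.Str.len sep = 0 then 0
        else PySem.Int.floordiv (PySem.Str.len x + PySem.Str.len sep) 4 + 1) with hcost
    by_cases h : total + c ≤ maxT
    · rw [if_neg (show ¬ total + c > maxT by omega)]
      simp only [h, decide_true, if_true, List.length_cons, ih]
      omega
    · rw [if_pos (show total + c > maxT by omega)]
      simp [h]

-- Index characterisation: on a non-decreasing list, entry i fits iff i is below the
-- takeWhile length.
lemma getD_le_iff (maxT : Int) (l : List Int)
    (hmono : l.Pairwise (· ≤ ·)) :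
    ∀ i, i < l.length →
      (l.getD i 0 ≤ maxT ↔ i < (l.takeWhile (fun y => decide (y ≤ maxT))).length) := by
  induction l with
  | nil => intro i hi; simp at hi
  | cons a l ih =>
    intro i hi
    rcases List.pairwise_cons.mp hmono with ⟨ha, hl⟩
    cases i with
    | zero =>
      simp only [List.getD, List.getElem?_cons_zero, Option.getD_some, List.takeWhile]
      by_cases h : a ≤ maxT
      · simp [h]
      · simp [h]
    | succ i =>
      simp only [List.getD_cons_succ, List.takeWhile]
      by_cases h : a ≤ maxT
      · simp only [h, decide_true, List.length_cons]
        rw [ih hl i (by simpa using hi)]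
        omega
      · simp only [h, decide_false]
        have hmem : l.getD i 0 ∈ l := by
          have hi' : i < l.length := by simpa using hi
          rw [List.getD_eq_getElem l 0 hi']
          exact List.getElem_mem hi'
        have := ha _ hmem
        constructor
        · intro hle; omega
        · intro hlt; simp at hlt
      
-- Binary-search correctness on a non-decreasing list.
lemma bsearch_eq (l : List Int) (maxT : Int) (hmono : l.Pairwise (· ≤ ·)) :
    ∀ n lo hi, hi - lo = n →
      lo ≤ (l.takeWhile (fun y => decide (y ≤ maxT))).length →
      (l.takeWhile (fun y => decide (y ≤ maxT))).length ≤ hi →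
      hi ≤ l.length →
      pvBSearch l maxT lo hi = (l.takeWhile (fun y => decide (y ≤ maxT))).length := by
  intro n
  induction n using Nat.strong_induction_on with
  | _ n ih =>
    intro lo hi hn hlo hhi hlen
    set c := (l.takeWhile (fun y => decide (y ≤ maxT))).length with hc
    rw [pvBSearch]
    by_cases h : lo < hi
    · rw [if_pos h]
      have hmid : lo ≤ (lo + hi) / 2 ∧ (lo + hi) / 2 < hi := by omega
      have hmlen : (lo + hi) / 2 < l.length := by omega
      by_cases hv : l.getD ((lo + hi) / 2) 0 ≤ maxT
      · rw [if_pos hv]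
        have : (lo + hi) / 2 < c := (getD_le_iff maxT l hmono _ hmlen).mp hv
        exact ih (hi - ((lo + hi) / 2 + 1)) (by omega) _ _ rfl (by omega) hhi hlen
      · rw [if_neg hv]
        have : ¬ ((lo + hi) / 2 < c) := fun hlt => hv ((getD_le_iff maxT l hmono _ hmlen).mpr hlt)
        exact ih ((lo + hi) / 2 - lo) (by omega) _ _ rfl hlo (by omega) (by omega)
    · rw [if_neg h]
      omega

lemma prefix_mono (sepLen : Int) (hs : 0 ≤ sepLen) (xs : List String) (total : Int) :
    (pvPrefix sepLen xs total).Pairwise (· ≤ ·) := by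
  induction xs generalizing total with
  | nil => simp [pvPrefix]
  | cons x rest ih =>
    simp only [pvPrefix, List.pairwise_cons]
    exact ⟨fun y hy => prefix_ge sepLen hs rest _ y hy, ih _⟩

-- ===== VERDICT (by name: the statement is the Claim_ definition above) =====
theorem truncate_list_to_tokens_spec : Claim_equal_truncate_list_to_tokens := by
  intro items maxT sep _
  unfold Spec_truncate_list_to_tokens truncate_list_to_tokens truncate_list_to_tokens_alt
  by_cases h : items = []
  · simp [h]
  · rw [if_neg h, if_neg h, aLoop_eq]
    have hs : 0 ≤ PySem.Str.len sep := by simp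
    have hmono := prefix_mono (PySem.Str.len sep) hs items 0
    have hlen := prefix_length (PySem.Str.len sep) items 0
    have hc := cutoff_takeWhile sep maxT items 0
    have hcle : ((pvPrefix (PySem.Str.len sep) items 0).takeWhile
        (fun y => decide (y ≤ maxT))).length ≤ (pvPrefix (PySem.Str.len sep) items 0).length :=
      (List.takeWhile_sublist _).length_le
    have hb := bsearch_eq (pvPrefix (PySem.Str.len sep) items 0) maxT hmono
      (pvPrefix (PySem.Str.len sep) items 0).length 0
      (pvPrefix (PySem.Str.len sep) items 0).length rfl (Nat.zero_le _) hcle le_rfl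
    have hk_eq : pvBSearch (pvPrefix (PySem.Str.len sep) items 0) maxT 0 items.length
        = pvCutoff sep maxT items 0 := by rw [← hlen, hb, hc]
    simp only [hlen, PySem.List.len_eq, hk_eq]
    by_cases hk : pvCutoff sep maxT items 0 < items.length
    · have hpos : ((items.length : Int) - (0 + (pvCutoff sep maxT items 0 : Int))) > 0 := by omega
      simp only [hk, if_true, hpos]
      have harg : ((items.length : Int) - (0 + (pvCutoff sep maxT items 0 : Int)))
          = ((items.length : Int) - (pvCutoff sep maxT items 0 : Int)) := by omega
      rw [harg]
    · have hz : ¬ ((0:Int) > 0) := by omega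
      simp only [hk, if_false, hz]
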